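-- pv_equiv track=rewrite | github.com/pearctgo/Knowcl | scripts/check_data.py | pick_id_column
-- ===== SOURCE A (Python) =====
-- from typing import Any, Dict, List, Optional, Set, Tuple
--
-- def safe_str(x: Any) -> str:
--     if x is None:
--         return ""
--     return str(x).strip()
--
-- def pick_id_column(columns: List[Any]) -> Optional[str]:
--     keywords = [
--         "blockid",
--         "block_id",
--         "region_id",
--         "region",
--         "block",
--         "街区",
--         "编号",
--         "id",
--     ]
--
--     for kw in keywords:
--         for c in columns:
--             name = safe_str(c).lower()
--             if kw in name:
--                 return str(c)
--
--     return None
-- ===== SOURCE B (Python) =====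
-- from typing import Any, List, Optional
--
--
-- def safe_str(x: Any) -> str:
--     if x is None:
--         return ""
--     return str(x).strip()
--
--
-- def pick_id_column(columns: List[Any]) -> Optional[str]:
--     keywords = [
--         "blockid",
--         "block_id",
--         "region_id",
--         "region",
--         "block",
--         "街区",
--         "编号",
--         "id",
--     ]
--
--     best = None  # (keyword priority, column) with strict-improvement updates
--     for c in columns:
--         name = safe_str(c).lower()
--         p = next((i for i, kw in enumerate(keywords) if kw in name), None)
--         if p is not None and (best is None or p < best[0]):
--             best = (p, c)
--     return str(best[1]) if best is not None else None
-- ===== Notes on version B (the rewrite author's own statement) =====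
-- stated objective: alternative
-- what changed: Inverted the loop nesting: one pass over the columns, computing for each column its first matching keyword priority and keeping a running best updated only on strictly smaller priority, instead of re-scanning all columns once per keyword.
import Mathlib
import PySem

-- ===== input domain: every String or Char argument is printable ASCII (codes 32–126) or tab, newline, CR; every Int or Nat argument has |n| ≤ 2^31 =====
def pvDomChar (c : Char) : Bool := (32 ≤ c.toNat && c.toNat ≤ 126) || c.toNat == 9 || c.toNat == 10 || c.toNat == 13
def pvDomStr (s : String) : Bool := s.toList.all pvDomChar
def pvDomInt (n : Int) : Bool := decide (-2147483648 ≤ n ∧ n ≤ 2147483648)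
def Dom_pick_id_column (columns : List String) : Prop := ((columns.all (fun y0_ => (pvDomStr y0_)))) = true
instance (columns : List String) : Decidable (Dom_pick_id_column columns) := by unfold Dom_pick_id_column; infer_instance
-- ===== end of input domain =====

-- B inverts A's loop nesting: a single pass over the columns keeping a best (priority, column),
-- instead of re-scanning all columns once per keyword (objective: alternative, same cost).
-- On String inputs Python's str(c) is c itself and safe_str(c) is c.strip(); both ports use that.

-- the keyword list both Pythons write out literally
def pvKeywords : List String :=
  ["blockid", "block_id", "region_id", "region", "block", "街区", "编号", "id"]

-- safe_str(c).lower() for a String column (x is None never holds on String inputs)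
def pvName (c : String) : List Char :=
  PySem.Chars.lower (PySem.Chars.strip c.toList)

-- ===== PORT A =====
-- inner loop: 'for c in columns: if kw in name: return str(c)'
def pickA_find (kw : String) : List String → Option String
  | [] => none
  | c :: cs => if PySem.Chars.isIn kw.toList (pvName c) then some c else pickA_find kw cs

-- outer loop: 'for kw in keywords: …'
def pickA_go (cols : List String) : List String → Option String
  | [] => none
  | kw :: rest =>
    match pickA_find kw cols with
    | some c => some c
    | none => pickA_go cols rest

def pick_id_column (columns : List String) : Option String :=
  pickA_go columns pvKeywords

-- ===== PORT B =====
-- 'next((i for i, kw in enumerate(keywords) if kw in name), None)'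
def pickB_first (i : Nat) (kws : List String) (nm : List Char) : Option Nat :=
  match kws with
  | [] => none
  | kw :: rest => if PySem.Chars.isIn kw.toList nm then some i else pickB_first (i + 1) rest nm

-- 'for c in columns: … if p is not None and (best is None or p < best[0]): best = (p, c)'
def pickB_loop : List String → Option (Nat × String) → Option (Nat × String)
  | [], best => best
  | c :: cs, best =>
    let p := pickB_first 0 pvKeywords (pvName c)
    pickB_loop cs
      (match p, best with
       | none, b => b
       | some q, none => some (q, c)
       | some q, some (bp, bc) => if q < bp then some (q, c) else some (bp, bc))

def pick_id_column_alt (columns : List String) : Option String :=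
  (pickB_loop columns none).map Prod.snd

-- ===== PRECONDITION & SPEC =====
def Spec_pick_id_column (columns : List String) (out : Option String) : Prop := out = pick_id_column_alt columns
instance (columns : List String) (out : Option String) : Decidable (Spec_pick_id_column columns out) := by unfold Spec_pick_id_column; infer_instance

-- ===== CLAIM (what is proved, stated in full; the proofs are below) =====
def Claim_equal_pick_id_column : Prop := ∀ (columns : List String), Dom_pick_id_column columns → Spec_pick_id_column columns (pick_id_column columns)

-- ===== LEMMAS AND PROOFS =====

-- A's search, instrumented with the keyword's running index (proof device only)
def pickAIdx (cols : List String) : Nat → List String → Option (Nat × String)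
  | _, [] => none
  | i, kw :: rest =>
    match pickA_find kw cols with
    | some c => some (i, c)
    | none => pickAIdx cols (i + 1) rest

theorem pickA_go_eq_idx (cols : List String) :
    ∀ (kws : List String) (i : Nat),
      pickA_go cols kws = (pickAIdx cols i kws).map Prod.snd := by
  intro kws
  induction kws with
  | nil => intro i; rfl
  | cons kw rest ih =>
    intro i
    simp only [pickA_go, pickAIdx]
    cases pickA_find kw cols with
    | some c => rfl
    | none => exact ih (i + 1)

theorem pickAIdx_nil : ∀ (i : Nat) (kws : List String), pickAIdx [] i kws = none := by
  intro i kws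
  induction kws generalizing i with
  | nil => rfl
  | cons kw rest ih => simpa [pickAIdx, pickA_find] using ih (i + 1)

theorem pickB_first_ge {nm : List Char} :
    ∀ {kws : List String} {i p : Nat}, pickB_first i kws nm = some p → i ≤ p := by
  intro kws
  induction kws with
  | nil => intro i p h; simp [pickB_first] at h
  | cons kw rest ih =>
    intro i p h
    simp only [pickB_first] at h
    split at h
    · exact le_of_eq (Option.some.inj h)
    · exact Nat.le_of_succ_le (ih h)

theorem pickAIdx_ge {cols : List String} :
    ∀ {kws : List String} {i q : Nat} {d : String}, pickAIdx cols i kws = some (q, d) → i ≤ q := by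
  intro kws
  induction kws with
  | nil => intro i q d h; simp [pickAIdx] at h
  | cons kw rest ih =>
    intro i q d h
    simp only [pickAIdx] at h
    cases hf : pickA_find kw cols with
    | some c => rw [hf] at h; simp at h; omega
    | none => rw [hf] at h; exact Nat.le_of_succ_le (ih h)

-- one-column unfolding of A's instrumented search, in B's merge shape
theorem pickAIdx_cons (c : String) (cs : List String) :
    ∀ (kws : List String) (i : Nat),
      pickAIdx (c :: cs) i kws =
        match pickB_first i kws (pvName c), pickAIdx cs i kws with
        | none, r => r
        | some p, none => some (p, c)
        | some p, some (q, d) => if q < p then some (q, d) else some (p, c) := by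
  intro kws
  induction kws with
  | nil => intro i; rfl
  | cons kw rest ih =>
    intro i
    by_cases hc : PySem.Chars.isIn kw.toList (pvName c) = true
    · have hfirst : pickB_first i (kw :: rest) (pvName c) = some i := by
        simp [pickB_first, hc]
      have hL : pickAIdx (c :: cs) i (kw :: rest) = some (i, c) := by
        simp [pickAIdx, pickA_find, hc]
      rw [hfirst, hL]
      cases hr : pickAIdx cs i (kw :: rest) with
      | none => rfl
      | some qd =>
        obtain ⟨q, d⟩ := qd
        have hq : i ≤ q := pickAIdx_ge hr
        simp [Nat.not_lt.mpr hq]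
    · have hfirst : pickB_first i (kw :: rest) (pvName c) = pickB_first (i + 1) rest (pvName c) := by
        simp [pickB_first, hc]
      rw [hfirst]
      cases hf : pickA_find kw cs with
      | some d =>
        have hL : pickAIdx (c :: cs) i (kw :: rest) = some (i, d) := by
          simp [pickAIdx, pickA_find, hc, hf]
        have hR : pickAIdx cs i (kw :: rest) = some (i, d) := by
          simp [pickAIdx, hf]
        rw [hL, hR]
        cases hp : pickB_first (i + 1) rest (pvName c) with
        | none => rfl
        | some p =>
          have h1 : i + 1 ≤ p := pickB_first_ge hp
          have h2 : i < p := by omega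
          simp [h2]
      | none =>
        have hL : pickAIdx (c :: cs) i (kw :: rest) = pickAIdx (c :: cs) (i + 1) rest := by
          simp [pickAIdx, pickA_find, hc, hf]
        have hR : pickAIdx cs i (kw :: rest) = pickAIdx cs (i + 1) rest := by
          simp [pickAIdx, hf]
        rw [hL, hR]
        exact ih (i + 1)

-- restarting B's loop from a saturated best equals merging with the fresh result
theorem pickB_loop_some :
    ∀ (cs : List String) (q : Nat) (b : String),
      pickB_loop cs (some (q, b)) =
        match pickB_loop cs none with
        | none => some (q, b)
        | some (p, c) => if p < q then some (p, c) else some (q, b) := by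
  intro cs
  induction cs with
  | nil => intro q b; rfl
  | cons c cs ih =>
    intro q b
    cases hp : pickB_first 0 pvKeywords (pvName c) with
    | none =>
      have h1 : pickB_loop (c :: cs) (some (q, b)) = pickB_loop cs (some (q, b)) := by
        simp [pickB_loop, hp]
      have h2 : pickB_loop (c :: cs) none = pickB_loop cs none := by
        simp [pickB_loop, hp]
      rw [h1, h2]
      exact ih q b
    | some r =>
      have h2 : pickB_loop (c :: cs) none = pickB_loop cs (some (r, c)) := by
        simp [pickB_loop, hp]
      by_cases hrq : r < q
      · have h1 : pickB_loop (c :: cs) (some (q, b)) = pickB_loop cs (some (r, c)) := by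
          simp [pickB_loop, hp, hrq]
        rw [h1, h2, ih r c]
        cases pickB_loop cs none with
        | none => simp [hrq]
        | some pd =>
          obtain ⟨p, d⟩ := pd
          by_cases hpr : p < r
          · have hpq : p < q := by omega
            simp [hpr, hpq]
          · simp [hpr, hrq]
      · have h1 : pickB_loop (c :: cs) (some (q, b)) = pickB_loop cs (some (q, b)) := by
          simp [pickB_loop, hp, hrq]
        rw [h1, h2, ih q b, ih r c]
        cases pickB_loop cs none with
        | none => simp [hrq]
        | some pd =>
          obtain ⟨p, d⟩ := pd
          by_cases hpr : p < r
          · simp [hpr]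
          · have h3 : ¬ p < q := by omega
            simp [hpr, hrq, h3]

theorem pickAIdx_eq_loop :
    ∀ (cs : List String), pickAIdx cs 0 pvKeywords = pickB_loop cs none := by
  intro cs
  induction cs with
  | nil => exact pickAIdx_nil 0 pvKeywords
  | cons c cs ih =>
    rw [pickAIdx_cons c cs pvKeywords 0, ih]
    cases hp : pickB_first 0 pvKeywords (pvName c) with
    | none => simp [pickB_loop, hp]
    | some r =>
      have h2 : pickB_loop (c :: cs) none = pickB_loop cs (some (r, c)) := by
        simp [pickB_loop, hp]
      rw [h2, pickB_loop_some]
      cases pickB_loop cs none with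
      | none => rfl
      | some pd =>
        obtain ⟨p, d⟩ := pd
        rfl

-- ===== VERDICT (by name: the statement is the Claim_ definition above) =====
theorem pick_id_column_spec : Claim_equal_pick_id_column := by
  intro columns _
  show pick_id_column columns = pick_id_column_alt columns
  unfold pick_id_column pick_id_column_alt
  rw [pickA_go_eq_idx columns pvKeywords 0, pickAIdx_eq_loop]
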